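-- pv_equiv track=rewrite | github.com/sagarikah/Python-codes | Basic programs/check_sum_of_squares_of_integers.py | check_squares
-- ===== SOURCE A (Python) =====
-- def check_squares(number):
--     flag= 0
--
--     for n1 in range(1,number//2):
--         sq_n1= n1*n1
--         sq_n2= number - sq_n1
--         n2= 1
--
--         while(n2 < sq_n2):
--             if n2*n2== sq_n2 and n2 != n1:
--                flag= 1
--                break
--
--             else:
--                 n2+= 1
--
--     if flag== 1:
--         return True
--     else:
--          return False
-- ===== SOURCE B (Python) =====
-- def _isqrt(n):
--     # binary search for floor(sqrt(n)), n >= 0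
--     lo, hi = 0, n + 1
--     while hi - lo > 1:
--         mid = (lo + hi) // 2
--         if mid * mid <= n:
--             lo = mid
--         else:
--             hi = mid
--     return lo
--
--
-- def check_squares(number):
--     n1 = 1
--     while n1 * n1 < number:
--         r = number - n1 * n1
--         s = _isqrt(r)
--         if s * s == r and s != n1:
--             return True
--         n1 += 1
--     return False
-- ===== Notes on version B (the rewrite author's own statement) =====
-- stated objective: faster
-- what changed: Instead of trying every candidate n2 by brute force inside a loop over all n1 up to number//2, B loops n1 only up to sqrt(number) and tests whether the remainder is a perfect square with a binary-search integer square root.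
import Mathlib
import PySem

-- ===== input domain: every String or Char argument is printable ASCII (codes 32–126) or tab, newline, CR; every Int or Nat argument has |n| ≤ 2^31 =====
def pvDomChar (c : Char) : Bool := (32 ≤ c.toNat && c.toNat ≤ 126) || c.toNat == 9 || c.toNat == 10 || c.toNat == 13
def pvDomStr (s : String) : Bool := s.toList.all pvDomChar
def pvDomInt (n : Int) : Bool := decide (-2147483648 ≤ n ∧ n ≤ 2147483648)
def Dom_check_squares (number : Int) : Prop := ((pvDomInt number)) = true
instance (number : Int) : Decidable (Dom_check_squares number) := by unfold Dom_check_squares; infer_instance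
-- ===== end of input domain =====

-- B replaces A's brute-force inner search over all n2 (outer loop to number//2) by a
-- loop of n1 up to sqrt(number) testing the remainder for squareness with a
-- binary-search integer square root.

-- ===== PORT A =====
-- inner 'while n2 < sq_n2' loop of A, fuel-bounded (fuel = remaining iterations
-- (sq_n2 - n2).toNat makes the loop structural; with that fuel it is exact):
-- returns true iff the loop breaks with flag = 1
def pvInnerAF : Nat → Int → Int → Int → Bool
  | 0, _, _, _ => false
  | fuel + 1, n1, sq_n2, n2 =>
    if n2 < sq_n2 then
      if n2 * n2 == sq_n2 && n2 != n1 then true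
      else pvInnerAF fuel n1 sq_n2 (n2 + 1)
    else false

def pvInnerA (n1 sq_n2 n2 : Int) : Bool := pvInnerAF (sq_n2 - n2).toNat n1 sq_n2 n2

def check_squares (number : Int) : Bool :=
  let flag : Int :=
    (PySem.List.pyRange 1 (PySem.Int.floordiv number 2) 1).foldl
      (fun flag n1 =>
        let sq_n1 := n1 * n1
        let sq_n2 := number - sq_n1
        -- while loop starting at n2 = 1: sets flag to 1 on break, else leaves it
        if pvInnerA n1 sq_n2 1 then 1 else flag)
      0
  if flag == 1 then true else false

-- ===== PORT B =====
-- _isqrt: binary search for floor(sqrt n), fuel-bounded (the gap hi - lo shrinks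
-- every iteration, so fuel = initial gap makes the loop structural and exact)
def pvIsqrtGoF : Nat → Int → Int → Int → Int
  | 0, _, lo, _ => lo
  | fuel + 1, n, lo, hi =>
    if hi - lo > 1 then
      let mid := PySem.Int.floordiv (lo + hi) 2
      if mid * mid ≤ n then pvIsqrtGoF fuel n mid hi else pvIsqrtGoF fuel n lo mid
    else lo

def pvIsqrt (n : Int) : Int := pvIsqrtGoF (n + 1).toNat n 0 (n + 1)

-- main while loop of B over n1 (fuel = number - n1 bounds the iterations left)
def pvBLoopF : Nat → Int → Int → Bool
  | 0, _, _ => false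
  | fuel + 1, number, n1 =>
    if n1 * n1 < number then
      let r := number - n1 * n1
      let s := pvIsqrt r
      if s * s == r && s != n1 then true
      else pvBLoopF fuel number (n1 + 1)
    else false

def check_squares_alt (number : Int) : Bool := pvBLoopF (number - 1).toNat number 1

-- ===== PRECONDITION & SPEC =====
def Spec_check_squares (number : Int) (out : Bool) : Prop := out = check_squares_alt number
instance (number : Int) (out : Bool) : Decidable (Spec_check_squares number out) := by unfold Spec_check_squares; infer_instance

-- ===== CLAIM (what is proved, stated in full; the proofs are below) =====
def Claim_equal_check_squares : Prop := ∀ (number : Int), Dom_check_squares number → Spec_check_squares number (check_squares number)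

-- ===== LEMMAS AND PROOFS =====

theorem pvSelf_le_mul_self (n : Int) : n ≤ n * n := by nlinarith [sq_nonneg n, sq_nonneg (n-1)]

theorem pvMidBounds (lo hi : Int) (h : hi - lo > 1) :
    lo < PySem.Int.floordiv (lo + hi) 2 ∧ PySem.Int.floordiv (lo + hi) 2 < hi := by
  have h2 := PySem.Int.floordiv_two_mid_bounds (lo := lo) (hi := hi) (by omega)
  have h3 : PySem.Int.floordiv (lo + hi) 2 = (lo + hi) / 2 :=
    PySem.Int.floordiv_eq_ediv_of_pos (by omega)
  omega

-- the existence predicate both programs decide (restricting the second component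
-- away from one loses nothing: a representation whose larger part is one has a
-- symmetric form with the parts swapped)
def pvPair (number : Int) : Prop :=
  ∃ a b : Int, 1 ≤ a ∧ 2 ≤ b ∧ b ≠ a ∧ a * a + b * b = number

-- A's inner while loop returns true iff some root of sq in [n2, sq) differs from n1
theorem pvInnerAF_iff : ∀ (fuel : Nat) (n1 sq n2 : Int), (sq - n2).toNat ≤ fuel →
    (pvInnerAF fuel n1 sq n2 = true ↔ ∃ k, n2 ≤ k ∧ k < sq ∧ k * k = sq ∧ k ≠ n1) := by
  intro fuel
  induction fuel with
  | zero =>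
    intro n1 sq n2 hf
    simp only [pvInnerAF]
    constructor
    · intro hh; exact absurd hh (by simp)
    · rintro ⟨k, a, b, c, d⟩; exact ((by omega : False)).elim
  | succ m ih =>
    intro n1 sq n2 hf
    rw [pvInnerAF]
    by_cases h : n2 < sq
    · rw [if_pos h]
      by_cases hc : (n2 * n2 == sq && n2 != n1) = true
      · rw [if_pos hc]
        simp only [Bool.and_eq_true, beq_iff_eq, bne_iff_ne] at hc
        exact ⟨fun _ => ⟨n2, le_rfl, h, hc.1, hc.2⟩, fun _ => rfl⟩
      · rw [if_neg hc, ih n1 sq (n2 + 1) (by omega)]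
        have hc' : ¬(n2 * n2 = sq ∧ n2 ≠ n1) := by
          simpa only [Bool.and_eq_true, beq_iff_eq, bne_iff_ne] using hc
        constructor
        · rintro ⟨k, a, b, c, d⟩; exact ⟨k, by omega, b, c, d⟩
        · rintro ⟨k, a, b, c, d⟩
          refine ⟨k, ?_, b, c, d⟩
          by_cases hk : k = n2
          · subst hk; exact absurd ⟨c, d⟩ hc'
          · omega
    · rw [if_neg h]
      constructor
      · intro hh; exact absurd hh (by simp)
      · rintro ⟨k, a, b, c, d⟩; exact ((h (lt_of_le_of_lt a b)).elim)

theorem pvInnerA_iff (n1 sq n2 : Int) :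
    pvInnerA n1 sq n2 = true ↔ ∃ k, n2 ≤ k ∧ k < sq ∧ k * k = sq ∧ k ≠ n1 :=
  pvInnerAF_iff (sq - n2).toNat n1 sq n2 le_rfl

-- flag fold: result is 1 iff the initial flag was 1 or some element fires
theorem pvFoldFlag (p : Int → Bool) (l : List Int) (f0 : Int) :
    (l.foldl (fun flag n1 => if p n1 then (1:Int) else flag) f0) = 1 ↔
      f0 = 1 ∨ ∃ x ∈ l, p x = true := by
  induction l generalizing f0 with
  | nil => simp
  | cons y l ih =>
    by_cases hy : p y = true
    · simp only [List.foldl_cons, hy, if_true, ih, List.mem_cons]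
      constructor
      · intro _; exact Or.inr ⟨y, Or.inl rfl, hy⟩
      · intro _; left; trivial
    · simp only [List.foldl_cons, hy, ih, List.mem_cons]
      constructor
      · rintro (h | ⟨x, hx, hpx⟩)
        · exact Or.inl h
        · exact Or.inr ⟨x, Or.inr hx, hpx⟩
      · rintro (h | ⟨x, (rfl | hx), hpx⟩)
        · exact Or.inl h
        · exact absurd hpx hy
        · exact Or.inr ⟨x, hx, hpx⟩

theorem pvIsqrtGoF_spec : ∀ (fuel : Nat) (n lo hi : Int), (hi - lo).toNat ≤ fuel →
    0 ≤ lo → lo * lo ≤ n → n < hi * hi → lo < hi →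
    (pvIsqrtGoF fuel n lo hi) * (pvIsqrtGoF fuel n lo hi) ≤ n ∧
    n < (pvIsqrtGoF fuel n lo hi + 1) * (pvIsqrtGoF fuel n lo hi + 1) ∧
    0 ≤ pvIsqrtGoF fuel n lo hi := by
  intro fuel
  induction fuel with
  | zero => intro n lo hi hf; omega
  | succ m ih =>
    intro n lo hi hf h0 h1 h2 h3
    rw [pvIsqrtGoF]
    by_cases h : hi - lo > 1
    · rw [if_pos h]
      obtain ⟨hm1, hm2⟩ := pvMidBounds lo hi h
      by_cases hc : (PySem.Int.floordiv (lo + hi) 2) * (PySem.Int.floordiv (lo + hi) 2) ≤ n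
      · rw [if_pos hc]
        exact ih n (PySem.Int.floordiv (lo + hi) 2) hi (by omega) (by omega) hc h2 (by omega)
      · rw [if_neg hc]
        exact ih n lo (PySem.Int.floordiv (lo + hi) 2) (by omega) h0 h1 (by omega) (by omega)
    · rw [if_neg h]
      have : hi = lo + 1 := by omega
      subst this
      exact ⟨h1, h2, h0⟩

theorem pvIsqrt_spec (n : Int) (hn : 0 ≤ n) :
    (pvIsqrt n) * (pvIsqrt n) ≤ n ∧ n < (pvIsqrt n + 1) * (pvIsqrt n + 1) ∧ 0 ≤ pvIsqrt n := by
  have h2 : n < (n + 1) * (n + 1) := by nlinarith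
  exact pvIsqrtGoF_spec (n + 1).toNat n 0 (n + 1) (by omega) le_rfl (by simpa) h2 (by omega)

-- the perfect-square test via pvIsqrt is exact (for r ≥ 1 any root is ≥ 1)
theorem pvIsqrt_square_iff (r n1 : Int) (hr : 1 ≤ r) :
    ((pvIsqrt r) * (pvIsqrt r) == r && pvIsqrt r != n1) = true ↔
      ∃ b, 1 ≤ b ∧ b * b = r ∧ b ≠ n1 := by
  obtain ⟨hs1, hs2, hs3⟩ := pvIsqrt_spec r (by omega)
  simp only [Bool.and_eq_true, beq_iff_eq, bne_iff_ne]
  constructor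
  · rintro ⟨he, hne⟩
    refine ⟨pvIsqrt r, ?_, he, hne⟩
    nlinarith
  · rintro ⟨b, hb1, hbe, hbne⟩
    have hbs : b = pvIsqrt r := by
      by_contra hne
      rcases lt_or_gt_of_ne hne with hlt | hgt
      · have : b * b < (pvIsqrt r) * (pvIsqrt r) :=
          mul_self_lt_mul_self (by omega) hlt
        omega
      · have : (pvIsqrt r + 1) * (pvIsqrt r + 1) ≤ b * b :=
          mul_self_le_mul_self (by omega) (by omega)
        omega
    subst hbs
    exact ⟨hbe, hbne⟩

theorem pvBLoopF_iff : ∀ (fuel : Nat) (number n1 : Int), (number - n1).toNat ≤ fuel →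
    1 ≤ n1 →
    (pvBLoopF fuel number n1 = true ↔
      ∃ a, n1 ≤ a ∧ a * a < number ∧ ∃ b, 1 ≤ b ∧ b * b = number - a * a ∧ b ≠ a) := by
  intro fuel
  induction fuel with
  | zero =>
    intro number n1 hf h1
    simp only [pvBLoopF]
    constructor
    · intro hh; exact absurd hh (by simp)
    · rintro ⟨a, ha1, ha2, -⟩
      have hnum : number ≤ n1 := by omega
      exact absurd ha2 (by nlinarith [pvSelf_le_mul_self a])
  | succ m ih =>
    intro number n1 hf h1
    rw [pvBLoopF]
    by_cases h : n1 * n1 < number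
    · rw [if_pos h]
      have hnlt : n1 < number := by nlinarith [pvSelf_le_mul_self n1]
      have hsq := pvIsqrt_square_iff (number - n1 * n1) n1 (by omega)
      by_cases hc : ((pvIsqrt (number - n1 * n1)) * (pvIsqrt (number - n1 * n1)) == number - n1 * n1
          && pvIsqrt (number - n1 * n1) != n1) = true
      · rw [if_pos hc]
        obtain ⟨b, hb1, hbe, hbne⟩ := hsq.mp hc
        exact ⟨fun _ => ⟨n1, le_rfl, h, b, hb1, hbe, hbne⟩, fun _ => rfl⟩
      · rw [if_neg hc, ih number (n1 + 1) (by omega) (by omega)]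
        constructor
        · rintro ⟨a, ha1, ha2, hb⟩; exact ⟨a, by omega, ha2, hb⟩
        · rintro ⟨a, ha1, ha2, hb⟩
          refine ⟨a, ?_, ha2, hb⟩
          by_cases hk : a = n1
          · subst hk; exact absurd (hsq.mpr hb) hc
          · omega
    · rw [if_neg h]
      constructor
      · intro hh; exact absurd hh (by simp)
      · rintro ⟨a, ha1, ha2, -⟩
        have : n1 * n1 ≤ a * a := mul_self_le_mul_self (by omega) ha1
        omega

theorem pvA_iff (number : Int) : check_squares number = true ↔ pvPair number := by
  have key : ((PySem.List.pyRange 1 (PySem.Int.floordiv number 2) 1).foldl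
        (fun flag n1 => if pvInnerA n1 (number - n1 * n1) 1 then (1:Int) else flag) 0 = 1)
      ↔ pvPair number := by
    rw [pvFoldFlag (fun n1 => pvInnerA n1 (number - n1 * n1) 1)
      (PySem.List.pyRange 1 (PySem.Int.floordiv number 2) 1) 0]
    constructor
    · rintro (h01 | ⟨x, hx, hp⟩)
      · exact absurd h01 (by norm_num)
      · rw [PySem.List.mem_pyRange_one] at hx
        rw [pvInnerA_iff] at hp
        obtain ⟨k, hk1, hk2, hk3, hk4⟩ := hp
        have hk2' : 2 ≤ k := by
          by_cases h1 : k = 1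
          · subst h1; simp only [one_mul] at hk3; omega
          · omega
        exact ⟨x, k, hx.1, hk2', hk4, by omega⟩
    · rintro ⟨a, b, ha1, hb2, hbne, heq⟩
      right
      have hb4 : 4 ≤ b * b := mul_self_le_mul_self (by omega) hb2
      have hblt : b < b * b := by nlinarith
      have ha2 : 2 * a + 2 ≤ a * a + 4 := by nlinarith [sq_nonneg (a - 1)]
      have hnum : 2 * a + 2 ≤ number := by omega
      have hfd : PySem.Int.floordiv number 2 = number / 2 :=
        PySem.Int.floordiv_eq_ediv_of_pos (by omega)
      refine ⟨a, ?_, ?_⟩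
      · rw [PySem.List.mem_pyRange_one]
        exact ⟨ha1, by rw [hfd]; omega⟩
      · rw [pvInnerA_iff]
        exact ⟨b, by omega, by omega, by omega, hbne⟩
  unfold check_squares
  simp only [beq_iff_eq]
  split_ifs with h
  · exact iff_of_true rfl (key.mp h)
  · exact iff_of_false (by simp) (fun hp => h (key.mpr hp))

theorem pvB_iff (number : Int) : check_squares_alt number = true ↔ pvPair number := by
  unfold check_squares_alt
  rw [pvBLoopF_iff (number - 1).toNat number 1 le_rfl le_rfl]
  constructor
  · rintro ⟨a, ha1, ha2, b, hb1, hbe, hbne⟩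
    -- when the found root is one, swap the pair: the symmetric form qualifies
    by_cases hb : 2 ≤ b
    · exact ⟨a, b, ha1, hb, hbne, by omega⟩
    · have hb1' : b = 1 := by omega
      subst hb1'
      exact ⟨1, a, le_rfl, by omega, by omega, by omega⟩
  · rintro ⟨a, b, ha1, hb2, hbne, heq⟩
    have hb4 : 4 ≤ b * b := mul_self_le_mul_self (by omega) hb2
    exact ⟨a, ha1, by omega, b, by omega, by omega, hbne⟩

-- ===== VERDICT (by name: the statement is the Claim_ definition above) =====
theorem check_squares_spec : Claim_equal_check_squares := by
  intro number _
  unfold Spec_check_squares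
  have hA := pvA_iff number
  have hB := pvB_iff number
  cases hca : check_squares number <;> cases hcb : check_squares_alt number <;>
    simp_all
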